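-- pv_equiv track=rewrite | github.com/WadeYin9712/GD-VCR | visualbert/models/train.py | add_index
-- ===== SOURCE A (Python) =====
-- def add_index(obj_orig_list):
--     added_index_all = []
--
--     for obj_orig in obj_orig_list:
--         added_index = []
--         freq = dict()
--         for obj in obj_orig:
--             if obj not in freq.keys():
--                 freq[obj] = 1
--             else:
--                 freq[obj] += 1
--
--             added_index.append(obj+str(freq[obj]))
--         added_index_all.append(added_index)
--
--     return added_index_all
-- ===== SOURCE B (Python) =====
-- def add_index(obj_orig_list):
--     added_index_all = []
--     for obj_orig in obj_orig_list:
--         # pass 1: group the indices of each distinct value, in first-occurrence order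
--         positions = {}
--         for i, obj in enumerate(obj_orig):
--             positions.setdefault(obj, []).append(i)
--         # pass 2: scatter obj+rank back into place, one group at a time
--         res = [""] * len(obj_orig)
--         for obj, idxs in positions.items():
--             for rank, i in enumerate(idxs, 1):
--                 res[i] = obj + str(rank)
--         added_index_all.append(res)
--     return added_index_all
-- ===== Notes on version B (the rewrite author's own statement) =====
-- stated objective: alternative
-- what changed: Replaces A's single left-to-right pass with an incremental frequency dict by a two-pass group-and-scatter per sublist: first group the indices of each distinct value, then write value+rank back into a preallocated result list group by group.
import Mathlib
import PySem

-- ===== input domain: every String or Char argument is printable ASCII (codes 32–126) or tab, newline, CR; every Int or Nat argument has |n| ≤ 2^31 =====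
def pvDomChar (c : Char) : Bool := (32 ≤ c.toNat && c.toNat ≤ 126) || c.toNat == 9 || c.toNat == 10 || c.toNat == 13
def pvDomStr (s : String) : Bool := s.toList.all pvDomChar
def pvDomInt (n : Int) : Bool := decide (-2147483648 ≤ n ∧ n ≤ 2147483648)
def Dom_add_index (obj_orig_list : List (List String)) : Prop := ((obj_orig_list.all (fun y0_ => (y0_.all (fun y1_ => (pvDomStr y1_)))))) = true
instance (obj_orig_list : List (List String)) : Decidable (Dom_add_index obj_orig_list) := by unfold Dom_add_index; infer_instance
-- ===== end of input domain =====

-- B replaces A's single-pass running frequency dict with a two-pass group-and-scatter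
-- per sublist (group indices by value, then write value+rank back by position):
-- a different algorithm of similar cost, not claimed faster.

-- ===== PORT A =====
-- inner loop of A: 'for obj in obj_orig: update freq; added_index.append(obj + str(freq[obj]))'
def addIndexInnerA : List String → List String → PySem.Dict String Int → List String
  | [], acc, _ => acc
  | obj :: rest, acc, freq =>
    let freq' := if freq.contains obj = false then freq.insert obj 1
                 else freq.insert obj (freq.getD obj 0 + 1)
    addIndexInnerA rest (acc ++ [obj ++ PySem.Int.toStr (freq'.getD obj 0)]) freq'

def add_index (obj_orig_list : List (List String)) : List (List String) :=
  obj_orig_list.map (fun obj_orig => addIndexInnerA obj_orig [] PySem.Dict.empty)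

-- ===== PORT B =====
-- inner body of B: pass 1 'positions.setdefault(obj, []).append(i)' over enumerate(row),
-- pass 2 'for obj, idxs in positions.items(): for rank, i in enumerate(idxs, 1): res[i] = obj + str(rank)'
-- ('res = [""] * len(row)' is Source B's placeholder-filled list; every slot is overwritten)
def addIndexInnerB (row : List String) : List String :=
  let positions : PySem.Dict String (List Int) :=
    (PySem.List.enumerate row 0).foldl (fun d p => d.modify p.2 [] (· ++ [p.1])) PySem.Dict.empty
  positions.items.foldl
    (fun res g =>
      (PySem.List.enumerate g.2 1).foldl
        (fun res q => PySem.List.pySetD res q.2 (g.1 ++ PySem.Int.toStr q.1)) res)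
    (List.replicate row.length "")

def add_index_alt (obj_orig_list : List (List String)) : List (List String) :=
  obj_orig_list.map (fun obj_orig => addIndexInnerB obj_orig)

-- ===== PRECONDITION & SPEC =====
def Spec_add_index (obj_orig_list : List (List String)) (out : List (List String)) : Prop := out = add_index_alt obj_orig_list
instance (obj_orig_list : List (List String)) (out : List (List String)) : Decidable (Spec_add_index obj_orig_list out) := by unfold Spec_add_index; infer_instance

-- ===== CLAIM (what is proved, stated in full; the proofs are below) =====
def Claim_equal_add_index : Prop := ∀ (obj_orig_list : List (List String)), Dom_add_index obj_orig_list → Spec_add_index obj_orig_list (add_index obj_orig_list)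

-- ===== LEMMAS AND PROOFS =====

-- the common characterisation of one sublist's result
def addIndexSpecInner (xs : List String) : List String :=
  xs.mapIdx (fun j obj => obj ++ PySem.Int.toStr (((xs.take j).count obj : Int) + 1))

lemma innerA_eq (xs : List String) : ∀ (p : List String) (acc : List String)
    (freq : PySem.Dict String Int)
    (_h1 : ∀ k, freq.getD k 0 = (p.count k : Int))
    (_h2 : ∀ k, freq.contains k = decide (k ∈ p)),
    addIndexInnerA xs acc freq =
      acc ++ xs.mapIdx (fun j obj =>
        obj ++ PySem.Int.toStr ((p.count obj : Int) + ((xs.take j).count obj : Int) + 1)) := by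
  induction xs with
  | nil => intro p acc freq _ _; simp [addIndexInnerA]
  | cons x xs ih =>
    intro p acc freq h1 h2
    have hfreq' : (if freq.contains x = false then freq.insert x 1
                   else freq.insert x (freq.getD x 0 + 1)) =
        freq.insert x ((p.count x : Int) + 1) := by
      by_cases hc : x ∈ p
      · have : freq.contains x = true := by rw [h2]; simp [hc]
        rw [if_neg (by simp [this]), h1]
      · have : freq.contains x = false := by rw [h2]; simp [hc]
        have hcnt : p.count x = 0 := List.count_eq_zero.mpr hc
        rw [if_pos this, hcnt]; norm_num
    rw [addIndexInnerA, hfreq']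
    rw [ih (p ++ [x]) _ _ ?_ ?_]
    · rw [PySem.Dict.getD_insert_self]
      simp only [List.mapIdx_cons, List.take_zero, List.count_nil, Nat.cast_zero, add_zero,
        List.append_assoc, List.singleton_append]
      congr 1
      congr 1
      apply List.ext_getElem
      · simp [List.length_mapIdx]
      · intro i hi1 hi2
        simp only [List.getElem_mapIdx]
        congr 2
        rw [List.take_succ_cons, List.count_append]
        simp only [List.count_cons, List.count_nil]
        push_cast
        ring
    · intro k
      rw [PySem.Dict.getD_insert, List.count_append, List.count_singleton']
      by_cases he : k = x
      · subst he; simp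
      · simp only [if_neg he, h1 k]
        simp
        exact fun h => he (Eq.symm h)
    · intro k
      rw [PySem.Dict.contains_insert, h2]
      by_cases he : k = x <;> simp [he]

lemma innerA_spec (xs : List String) :
    addIndexInnerA xs [] PySem.Dict.empty = addIndexSpecInner xs := by
  rw [innerA_eq xs [] [] PySem.Dict.empty (by simp) (by simp)]
  unfold addIndexSpecInner
  simp

-- ---- B side: group-and-scatter ----

-- the group of a value v: the enumerate-indices at which row holds v
def idxsOf (row : List String) (v : String) : List Int :=
  ((PySem.List.enumerate row 0).filter (fun p => p.2 == v)).map (·.1)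

-- one scatter pass: 'for rank, i in enumerate(idxs, r): res[i] = v + str(rank)'
def writeG (v : String) (idxs : List Int) (r : Int) (res : List String) : List String :=
  (PySem.List.enumerate idxs r).foldl
    (fun res q => PySem.List.pySetD res q.2 (v ++ PySem.Int.toStr q.1)) res

-- the full second pass over the groups of the values in S
def scatterAll (row : List String) (S : List String) (res : List String) : List String :=
  S.foldl (fun res v => writeG v (idxsOf row v) 1 res) res

lemma writeG_cons (v : String) (i : Int) (idxs : List Int) (r : Int) (res : List String) :
    writeG v (i :: idxs) r res =
      writeG v idxs (r + 1) (PySem.List.pySetD res i (v ++ PySem.Int.toStr r)) := by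
  simp [writeG, PySem.List.enumerate_cons]

lemma length_writeG (v : String) (idxs : List Int) : ∀ (r : Int) (res : List String),
    (writeG v idxs r res).length = res.length := by
  induction idxs with
  | nil => intro r res; rfl
  | cons i idxs ih =>
    intro r res
    rw [writeG_cons, ih]
    exact PySem.List.length_pySetD res i _

lemma writeG_untouched (v : String) (idxs : List Int) (j : Nat)
    (h : ∀ i ∈ idxs, ∃ n : Nat, i = (n : Int) ∧ n ≠ j) :
    ∀ (r : Int) (res : List String), (writeG v idxs r res)[j]? = res[j]? := by
  induction idxs with
  | nil => intro r res; rfl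
  | cons i idxs ih =>
    intro r res
    obtain ⟨n, hn, hnj⟩ := h i (by simp)
    rw [writeG_cons, ih (fun i hi => h i (by simp [hi])), hn,
      PySem.List.pySetD_natCast, List.getElem?_set_ne hnj]

lemma writeG_hit (v : String) (j : Nat) (pre post : List Int)
    (hpost : ∀ i ∈ post, ∃ n : Nat, i = (n : Int) ∧ n ≠ j) :
    ∀ (r : Int) (res : List String), j < res.length →
    (writeG v (pre ++ (j : Int) :: post) r res)[j]? =
      some (v ++ PySem.Int.toStr (r + (pre.length : Int))) := by
  induction pre with
  | nil =>
    intro r res hj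
    rw [List.nil_append, writeG_cons, writeG_untouched v post j hpost,
      PySem.List.pySetD_natCast, List.getElem?_set_self hj]
    norm_num
  | cons a pre ih =>
    intro r res hj
    rw [List.cons_append, writeG_cons,
      ih (r + 1) _ (by rw [PySem.List.length_pySetD]; exact hj)]
    rw [show r + 1 + (pre.length : Int) = r + ((a :: pre).length : Int) by push_cast [List.length_cons]; ring]

lemma length_scatterAll (row S : List String) : ∀ (res : List String),
    (scatterAll row S res).length = res.length := by
  induction S with
  | nil => intro res; rfl
  | cons v S ih =>
    intro res
    show (scatterAll row S _).length = _
    rw [ih, length_writeG]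

lemma mem_idxsOf (row : List String) (v : String) (i : Int) :
    i ∈ idxsOf row v ↔ ∃ (m : Nat) (_ : m < row.length), i = (m : Int) ∧ row[m] = v := by
  constructor
  · intro hi
    obtain ⟨p, hp, hpi⟩ := List.mem_map.mp hi
    obtain ⟨hpe, hpv⟩ := List.mem_filter.mp hp
    obtain ⟨k, hk, hpk⟩ := (PySem.List.mem_enumerate_iff row 0 p).mp hpe
    refine ⟨k, hk, ?_, ?_⟩
    · rw [← hpi, hpk]; simp
    · have := beq_iff_eq.mp hpv
      rw [hpk] at this; exact this
  · rintro ⟨m, hm, rfl, hv⟩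
    refine List.mem_map.mpr ⟨((m : Int), v), List.mem_filter.mpr ⟨?_, by simp⟩, rfl⟩
    exact (PySem.List.mem_enumerate_iff row 0 _).mpr ⟨m, hm, by simp [hv]⟩

lemma count_filter_enumerate (v : String) (xs : List String) : ∀ (s : Int),
    ((PySem.List.enumerate xs s).filter (fun p => p.2 == v)).length = xs.count v := by
  induction xs with
  | nil => intro s; rfl
  | cons x xs ih =>
    intro s
    rw [PySem.List.enumerate_cons]
    by_cases hx : x = v
    · simp [hx, ih]
    · simp [hx, ih]

lemma idxsOf_split (row : List String) (j : Nat) (hj : j < row.length) (v : String)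
    (hv : row[j] = v) :
    ∃ pre post, idxsOf row v = pre ++ (j : Int) :: post ∧
      pre.length = (row.take j).count v ∧
      (∀ i ∈ post, ∃ n : Nat, i = (n : Int) ∧ n ≠ j) := by
  have hrow : row = row.take j ++ v :: row.drop (j + 1) := by
    rw [← hv, List.getElem_cons_drop hj, List.take_append_drop]
  have hlen : (row.take j).length = j := by simp [Nat.le_of_lt hj]
  refine ⟨((PySem.List.enumerate (row.take j) 0).filter (fun p => p.2 == v)).map (·.1),
    ((PySem.List.enumerate (row.drop (j + 1)) ((j : Int) + 1)).filter
      (fun p => p.2 == v)).map (·.1), ?_, ?_, ?_⟩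
  · unfold idxsOf
    conv_lhs => rw [hrow]
    rw [PySem.List.enumerate_append, hlen, PySem.List.enumerate_cons]
    simp [List.filter_append]
  · rw [List.length_map, count_filter_enumerate]
  · intro i hi
    obtain ⟨p, hp, hpi⟩ := List.mem_map.mp hi
    obtain ⟨hpe, _⟩ := List.mem_filter.mp hp
    obtain ⟨k, hk, hpk⟩ := (PySem.List.mem_enumerate_iff _ _ p).mp hpe
    refine ⟨j + 1 + k, ?_, by omega⟩
    rw [← hpi, hpk]
    push_cast
    ring

lemma scatterAll_untouched (row : List String) (j : Nat) (hj : j < row.length) :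
    ∀ (S : List String), row[j] ∉ S → ∀ (res : List String),
    (scatterAll row S res)[j]? = res[j]? := by
  intro S
  induction S with
  | nil => intro _ res; rfl
  | cons v S ih =>
    intro hnm res
    show (scatterAll row S _)[j]? = _
    rw [ih (fun h => hnm (List.mem_cons_of_mem _ h))]
    apply writeG_untouched
    intro i hi
    obtain ⟨m, hm, rfl, hmv⟩ := (mem_idxsOf row v i).mp hi
    refine ⟨m, rfl, ?_⟩
    intro hmj
    subst hmj
    exact hnm (by simp [← hmv])

lemma scatterAll_hit (row : List String) (j : Nat) (hj : j < row.length) :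
    ∀ (S : List String), row[j] ∈ S → S.Nodup → ∀ (res : List String),
    res.length = row.length →
    (scatterAll row S res)[j]? =
      some (row[j] ++ PySem.Int.toStr (((row.take j).count row[j] : Int) + 1)) := by
  intro S
  induction S with
  | nil => intro h; exact absurd h (List.not_mem_nil)
  | cons v S ih =>
    intro hmem hnd res hres
    show (scatterAll row S _)[j]? = _
    by_cases hv : v = row[j]
    · subst hv
      rw [scatterAll_untouched row j hj S (List.nodup_cons.mp hnd).1]
      obtain ⟨pre, post, hsplit, hcnt, hpost⟩ := idxsOf_split row j hj _ rfl
      beta_reduce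
      rw [hsplit, writeG_hit _ j pre post hpost 1 res (hres ▸ hj), hcnt,
        Int.add_comm 1]
    · have : row[j] ∈ S := by
        rcases List.mem_cons.mp hmem with h | h
        · exact absurd h.symm hv
        · exact h
      rw [ih this (List.Nodup.of_cons hnd) _ (by rw [length_writeG]; exact hres)]

-- the dict built by pass 1, characterised
lemma dictB_getD (row : List String) (v : String) :
    ((PySem.List.enumerate row 0).foldl
      (fun d p => d.modify p.2 [] (· ++ [p.1])) PySem.Dict.empty).getD v [] = idxsOf row v := by
  rw [show ((PySem.List.enumerate row 0).foldl
      (fun d p => d.modify p.2 [] (· ++ [p.1])) PySem.Dict.empty) =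
    (((PySem.List.enumerate row 0).map Prod.swap).foldl
      (fun d p => d.modify p.1 [] (· ++ [p.2])) PySem.Dict.empty) from
    (List.foldl_map (f := Prod.swap)
      (g := fun (d : PySem.Dict String (List Int)) (p : String × Int) =>
        d.modify p.1 [] (· ++ [p.2]))
      (l := PySem.List.enumerate row 0) (init := PySem.Dict.empty)).symm]
  rw [PySem.Dict.getD_foldl_modify_append]
  simp [idxsOf, List.filter_map, Function.comp_def]

lemma dictB_keys (row : List String) :
    ((PySem.List.enumerate row 0).foldl
      (fun d p => d.modify p.2 [] (· ++ [p.1])) PySem.Dict.empty).keys = PySem.Set.ofList row := by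
  rw [PySem.Dict.keys_foldl_modify_key (PySem.List.enumerate row 0) (fun p => p.2) []
    (fun _ p => (· ++ [p.1])) PySem.Dict.empty]
  rw [PySem.Dict.keys_empty, PySem.List.map_snd_enumerate]
  rfl

lemma innerB_spec (row : List String) : addIndexInnerB row = addIndexSpecInner row := by
  show (((PySem.List.enumerate row 0).foldl
      (fun d p => d.modify p.2 [] (· ++ [p.1])) PySem.Dict.empty).items.foldl
    (fun res g =>
      (PySem.List.enumerate g.2 1).foldl
        (fun res q => PySem.List.pySetD res q.2 (g.1 ++ PySem.Int.toStr q.1)) res)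
    (List.replicate row.length "")) = addIndexSpecInner row
  rw [PySem.Dict.items_eq_map_keys _ (by rw [dictB_keys]; exact PySem.Set.nodup_ofList row) [],
    dictB_keys, List.foldl_map]
  have hbody : (fun (res : List String) (k : String) =>
      (PySem.List.enumerate (((PySem.List.enumerate row 0).foldl
        (fun d p => d.modify p.2 [] (· ++ [p.1])) PySem.Dict.empty).getD k []) 1).foldl
        (fun res q => PySem.List.pySetD res q.2 (k ++ PySem.Int.toStr q.1)) res) =
      (fun res k => writeG k (idxsOf row k) 1 res) := by
    funext res k
    rw [dictB_getD, writeG]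
  rw [hbody]
  show scatterAll row (PySem.Set.ofList row) (List.replicate row.length "") = _
  apply List.ext_getElem?
  intro j
  by_cases hj : j < row.length
  · rw [scatterAll_hit row j hj _ ((PySem.Set.mem_ofList row _).mpr (List.getElem_mem hj))
      (PySem.Set.nodup_ofList row) _ (by simp)]
    unfold addIndexSpecInner
    rw [List.getElem?_mapIdx]
    simp [hj]
  · have h1 : (scatterAll row (PySem.Set.ofList row) (List.replicate row.length "")).length ≤ j := by
      rw [length_scatterAll, List.length_replicate]; omega
    have h2 : (addIndexSpecInner row).length ≤ j := by
      unfold addIndexSpecInner; rw [List.length_mapIdx]; omega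
    rw [List.getElem?_eq_none h1, List.getElem?_eq_none h2]

lemma innerB_eq_innerA (xs : List String) :
    addIndexInnerA xs [] PySem.Dict.empty = addIndexInnerB xs := by
  rw [innerA_spec, innerB_spec]

-- ===== VERDICT (by name: the statement is the Claim_ definition above) =====
theorem add_index_spec : Claim_equal_add_index := by
  intro xs _
  unfold Spec_add_index add_index add_index_alt
  apply List.map_congr_left
  intro l _
  exact innerB_eq_innerA l
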